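-- pv_equiv track=rewrite | github.com/YooGunWook/coding_test | 백준/백준_1034번.py | solution
-- ===== SOURCE A (Python) =====
-- import collections
--
-- def solution(mat, k):
--     max_on = 0  # 출력값
--     for row in mat:  # 각 row별로 탐색
--         row_count = collections.Counter(row)
--         if row_count["0"] > k:  # k보다 0이 작으면 모든 램프를 켤 수 없기 때문에 continue
--             continue
--         # k보다 크고 둘의 나머지가 같아야 전부다 끌 수 있음
--         if row_count["0"] <= k and k % 2 == row_count["0"] % 2:
--             same_row = mat.count(row)  # 해당 행이랑 같은 애들의 개수를 세주면 최대 개수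
--             if same_row > max_on:
--                 max_on = same_row
--     return max_on
-- ===== SOURCE B (Python) =====
-- def solution(mat, k):
--     best = 0
--     srt = sorted(mat)
--     n = len(srt)
--     i = 0
--     while i < n:
--         j = i
--         while j < n and srt[j] == srt[i]:
--             j += 1
--         zeros = srt[i].count("0")
--         if zeros <= k and (k - zeros) % 2 == 0 and j - i > best:
--             best = j - i
--         i = j
--     return best
-- ===== Notes on version B (the rewrite author's own statement) =====
-- stated objective: faster
-- what changed: B sorts the rows and scans the sorted list once, measuring each run of equal rows with two indices (the run length is that row's frequency) and testing each distinct row's eligibility once; A instead loops over every row, builds a per-row character Counter and rescans the whole list with mat.count for each eligible row.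
import Mathlib
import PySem

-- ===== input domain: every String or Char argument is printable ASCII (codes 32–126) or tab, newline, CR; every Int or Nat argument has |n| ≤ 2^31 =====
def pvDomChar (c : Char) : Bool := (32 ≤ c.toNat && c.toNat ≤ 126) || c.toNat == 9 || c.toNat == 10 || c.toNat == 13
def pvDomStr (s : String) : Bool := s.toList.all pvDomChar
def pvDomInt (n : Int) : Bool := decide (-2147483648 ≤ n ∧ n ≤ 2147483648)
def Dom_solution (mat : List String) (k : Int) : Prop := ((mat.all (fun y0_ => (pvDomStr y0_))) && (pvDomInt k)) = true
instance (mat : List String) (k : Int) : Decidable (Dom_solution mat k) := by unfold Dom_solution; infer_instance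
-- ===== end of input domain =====

-- B sorts the rows and scans the sorted list once: each maximal run of equal
-- rows gives that row's frequency, tested once — instead of A's per-row rescan.


-- ===== PORT A =====
def solution (mat : List String) (k : Int) : Int :=
  mat.foldl (fun max_on row =>
    let row_count := PySem.Dict.counter row.toList
    if row_count.getD '0' 0 > k then max_on
    else if row_count.getD '0' 0 ≤ k ∧
        PySem.Int.mod k 2 = PySem.Int.mod (row_count.getD '0' 0) 2 then
      let same_row : Int := (PySem.List.count mat row : Int)
      if same_row > max_on then same_row else max_on
    else max_on) 0

-- ===== PORT B =====
-- inner `while j < n and srt[j] == srt[i]` scan = splitting off the leading run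
-- of rows equal to `row` (takeWhile/dropWhile on the same equality test); exact.
def runMax (k : Int) : List String → Int → Int
  | [], best => best
  | row :: tl, best =>
    let run := tl.takeWhile (fun r => r == row)
    let rest := tl.dropWhile (fun r => r == row)
    let cnt : Int := ((1 + run.length : ℕ) : Int)
    let zeros : Int := (PySem.Str.count row "0" : Int)
    let best' := if zeros ≤ k ∧ PySem.Int.mod (k - zeros) 2 = 0 ∧ cnt > best then cnt else best
    runMax k rest best'
termination_by l _ => l.length
decreasing_by
  exact Nat.lt_succ_of_le (List.Sublist.length_le (List.dropWhile_sublist _))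

def solution_alt (mat : List String) (k : Int) : Int :=
  runMax k (PySem.List.sorted mat (fun x => x) false) 0

-- ===== PRECONDITION & SPEC =====
def Spec_solution (mat : List String) (k : Int) (out : Int) : Prop := out = solution_alt mat k
instance (mat : List String) (k : Int) (out : Int) : Decidable (Spec_solution mat k out) := by unfold Spec_solution; infer_instance

-- ===== CLAIM (what is proved, stated in full; the proofs are below) =====
def Claim_equal_solution : Prop := ∀ (mat : List String) (k : Int), Dom_solution mat k → Spec_solution mat k (solution mat k)

-- ===== LEMMAS AND PROOFS =====

-- Python's single-char substring count equals the character count of the list.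
theorem countgo_single (c : Char) (s : List Char) : ∀ (fuel acc : ℕ), s.length ≤ fuel →
    PySem.Chars.count.go [c] fuel s acc = acc + s.count c := by
  induction s with
  | nil => intro fuel acc h; cases fuel <;> simp [PySem.Chars.count.go]
  | cons x t ih =>
    intro fuel acc h
    cases fuel with
    | zero => simp at h
    | succ f =>
      have hf : t.length ≤ f := by simp at h; omega
      simp only [PySem.Chars.count.go, List.isPrefixOf, Bool.and_true]
      by_cases hc : c = x
      · subst hc
        simp only [BEq.rfl, if_true, List.length_cons, List.length_nil, List.drop_succ_cons,
          List.drop_zero]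
        rw [ih f (acc+1) hf, List.count_cons_self]
        omega
      · have hcx : (c == x) = false := by simp [hc]
        simp only [hcx, Bool.false_eq_true, if_false]
        rw [ih f acc hf, List.count_cons_of_ne (by simpa using Ne.symm hc)]

theorem chars_count_single (c : Char) (s : List Char) :
    PySem.Chars.count s [c] = s.count c := by
  simp [PySem.Chars.count, countgo_single c s s.length 0 (le_refl _)]

-- the common guard of both programs
def condZ (k : Int) (r : String) : Bool :=
  decide ((r.toList.count '0' : Int) ≤ k
    ∧ PySem.Int.mod k 2 = PySem.Int.mod ((r.toList.count '0' : Int)) 2)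

-- the value both programs compute: the max, over eligible rows, of that row's multiplicity
def GoodMax (mat : List String) (k : Int) (v : Int) : Prop :=
  0 ≤ v
  ∧ (∀ r ∈ mat, condZ k r = true → ((mat.count r : ℕ) : Int) ≤ v)
  ∧ (v = 0 ∨ ∃ r ∈ mat, condZ k r = true ∧ v = ((mat.count r : ℕ) : Int))

theorem goodMax_unique (mat : List String) (k : Int) (x y : Int)
    (hx : GoodMax mat k x) (hy : GoodMax mat k y) : x = y := by
  obtain ⟨hx0, hxub, hxw⟩ := hx
  obtain ⟨hy0, hyub, hyw⟩ := hy
  have hxy : x ≤ y := by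
    rcases hxw with h | ⟨r, hr, hc, he⟩
    · omega
    · rw [he]; exact hyub r hr hc
  have hyx : y ≤ x := by
    rcases hyw with h | ⟨r, hr, hc, he⟩
    · omega
    · rw [he]; exact hxub r hr hc
  omega

-- characterization of the guarded running max (A's loop shape)
theorem foldlMax_bounds {α : Type} (C : α → Bool) (v : α → Int) :
    ∀ (l : List α) (a : Int),
      a ≤ l.foldl (fun m r => if C r then max m (v r) else m) a
      ∧ (∀ r ∈ l, C r = true → v r ≤ l.foldl (fun m r => if C r then max m (v r) else m) a)
      ∧ (l.foldl (fun m r => if C r then max m (v r) else m) a = a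
         ∨ ∃ r ∈ l, C r = true ∧ l.foldl (fun m r => if C r then max m (v r) else m) a = v r) := by
  intro l
  induction l with
  | nil => intro a; simp
  | cons x t ih =>
    intro a
    obtain ⟨h1, h2, h3⟩ := ih (if C x then max a (v x) else a)
    refine ⟨?_, ?_, ?_⟩
    · refine le_trans ?_ h1; split_ifs <;> omega
    · intro r hr hc
      rcases List.mem_cons.mp hr with hr | hr
      · subst hr
        refine le_trans ?_ h1; simp [hc]
      · exact h2 r hr hc
    · rcases h3 with h3 | ⟨r, hr, hc, he⟩
      · rw [List.foldl_cons, h3]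
        by_cases hx : C x = true
        · simp only [hx, if_true]
          rcases max_choice a (v x) with h | h
          · left; exact h
          · right; exact ⟨x, List.mem_cons_self, hx, h⟩
        · left; simp [hx]
      · right; exact ⟨r, List.mem_cons_of_mem x hr, hc, by rw [List.foldl_cons]; exact he⟩

-- A in canonical form
theorem solution_canon (mat : List String) (k : Int) :
    solution mat k
      = mat.foldl (fun m r => if condZ k r then max m ((PySem.List.count mat r : Int)) else m) 0 := by
  unfold solution
  have hstep : (fun (max_on : Int) (row : String) =>
      let row_count := PySem.Dict.counter row.toList
      if row_count.getD '0' 0 > k then max_on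
      else if row_count.getD '0' 0 ≤ k ∧
          PySem.Int.mod k 2 = PySem.Int.mod (row_count.getD '0' 0) 2 then
        let same_row : Int := (PySem.List.count mat row : Int)
        if same_row > max_on then same_row else max_on
      else max_on)
      = (fun m r => if condZ k r then max m ((PySem.List.count mat r : Int)) else m) := by
    funext m r
    simp only [PySem.Dict.getD_counter, condZ]
    split_ifs with h1 h2 h3 h4 h5 <;> simp_all <;> omega
  rw [hstep]

theorem solution_good (mat : List String) (k : Int) : GoodMax mat k (solution mat k) := by
  rw [solution_canon]
  obtain ⟨h1, h2, h3⟩ := foldlMax_bounds (condZ k) (fun r => (PySem.List.count mat r : Int)) mat 0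
  refine ⟨h1, ?_, ?_⟩
  · intro r hr hc
    simpa [PySem.List.count_eq] using h2 r hr hc
  · rcases h3 with h | ⟨r, hr, hc, he⟩
    · left; exact h
    · right; exact ⟨r, hr, hc, by simpa [PySem.List.count_eq] using he⟩

-- B's guard is the same eligibility test as A's condZ
theorem guard_iff_condZ (row : String) (k : Int) :
    (((PySem.Str.count row "0" : ℕ) : Int) ≤ k
      ∧ PySem.Int.mod (k - ((PySem.Str.count row "0" : ℕ) : Int)) 2 = 0)
    ↔ condZ k row = true := by
  have hz : PySem.Str.count row "0" = row.toList.count '0' := by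
    have h0 : PySem.Str.count row "0" = PySem.Chars.count row.toList ['0'] := rfl
    rw [h0, chars_count_single]
  have hmod2 : ∀ a : Int, PySem.Int.mod a 2 = a % 2 := fun a =>
    PySem.Int.mod_eq_emod_of_pos (by omega)
  unfold condZ
  rw [decide_eq_true_iff, hz]
  simp only [hmod2]
  constructor <;> rintro ⟨h1, h2⟩ <;> exact ⟨h1, by omega⟩

-- one-step unfoldings of B's loop
theorem runMax_nil (k : Int) (best : Int) : runMax k [] best = best := by rw [runMax]

theorem runMax_cons (k : Int) (row : String) (tl : List String) (best : Int) :
    runMax k (row :: tl) best =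
      runMax k (tl.dropWhile (fun r => r == row))
        (if ((PySem.Str.count row "0" : ℕ) : Int) ≤ k
            ∧ PySem.Int.mod (k - ((PySem.Str.count row "0" : ℕ) : Int)) 2 = 0
            ∧ ((1 + (tl.takeWhile (fun r => r == row)).length : ℕ) : Int) > best
         then ((1 + (tl.takeWhile (fun r => r == row)).length : ℕ) : Int) else best) := by
  rw [runMax]

-- in a sorted list whose elements all dominate `row`, dropping the leading
-- `== row` run leaves no occurrence of `row`
theorem not_mem_dropWhile_sorted (row : String) (tl : List String)
    (hge : ∀ x ∈ tl, row ≤ x) (hp : tl.Pairwise (· ≤ ·)) :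
    row ∉ tl.dropWhile (fun r => r == row) := by
  induction tl with
  | nil => simp
  | cons x t ih =>
    rw [List.dropWhile_cons]
    by_cases hx : (x == row) = true
    · rw [if_pos hx]
      exact ih (fun y hy => hge y (List.mem_cons_of_mem x hy)) hp.of_cons
    · rw [if_neg hx]
      intro hmem
      rcases List.mem_cons.mp hmem with h | h
      · exact hx (beq_iff_eq.mpr h.symm)
      · have h1 : x ≤ row := (List.pairwise_cons.mp hp).1 row h
        have h2 : row ≤ x := hge x List.mem_cons_self
        exact hx (beq_iff_eq.mpr (le_antisymm h1 h2))

theorem runMax_good (k : Int) : ∀ (l : List String), l.Pairwise (· ≤ ·) → ∀ best : Int,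
    (best ≤ runMax k l best)
    ∧ (∀ r ∈ l, condZ k r = true → ((l.count r : ℕ) : Int) ≤ runMax k l best)
    ∧ (runMax k l best = best
       ∨ ∃ r ∈ l, condZ k r = true ∧ runMax k l best = ((l.count r : ℕ) : Int)) := by
  intro l
  induction hn : l.length using Nat.strong_induction_on generalizing l with
  | _ n ih =>
    match l with
    | [] =>
      intro _ best
      rw [runMax_nil]
      exact ⟨le_refl _, by intro r hr; simp at hr, Or.inl rfl⟩
    | row :: tl =>
      intro hp best
      rw [runMax_cons]
      set run := tl.takeWhile (fun r => r == row) with hrun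
      set rest := tl.dropWhile (fun r => r == row) with hrest
      set cnt : Int := ((1 + run.length : ℕ) : Int) with hcnt
      set best' : Int := (if ((PySem.Str.count row "0" : ℕ) : Int) ≤ k
          ∧ PySem.Int.mod (k - ((PySem.Str.count row "0" : ℕ) : Int)) 2 = 0
          ∧ cnt > best then cnt else best) with hbest'
      have hsplit : run ++ rest = tl := by rw [hrun, hrest]; exact List.takeWhile_append_dropWhile
      have hruneq : ∀ r ∈ run, r = row := by
        intro r hr
        have := List.mem_takeWhile_imp (hrun ▸ hr)
        exact eq_of_beq this
      have hge : ∀ x ∈ tl, row ≤ x := fun x hx => (List.pairwise_cons.mp hp).1 x hx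
      have hnm : row ∉ rest := hrest ▸ not_mem_dropWhile_sorted row tl hge hp.of_cons
      have hprest : rest.Pairwise (· ≤ ·) :=
        List.Pairwise.sublist (List.dropWhile_sublist _) hp.of_cons
      have hlrest : rest.length < n := by
        rw [← hn]
        exact Nat.lt_succ_of_le (List.Sublist.length_le (hrest ▸ List.dropWhile_sublist _))
      obtain ⟨ih1, ih2, ih3⟩ := ih rest.length hlrest rest rfl hprest best'
      -- counts in l = row :: tl in terms of run and rest
      have hcountrow : (((row :: tl).count row : ℕ) : Int) = cnt := by
        rw [← hsplit, List.count_cons_self, List.count_append,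
          List.count_eq_zero.mpr hnm, hcnt]
        have : run.count row = run.length :=
          List.count_eq_length.mpr (fun b hb => ((hruneq b hb) ▸ rfl))
        omega
      have hcountne : ∀ r, r ≠ row → (row :: tl).count r = rest.count r := by
        intro r hne
        rw [← hsplit, List.count_cons_of_ne (Ne.symm hne), List.count_append,
          List.count_eq_zero.mpr (fun hmem => hne (hruneq r hmem))]
        omega
      have hb'ge : best ≤ best' := by
        rw [hbest']; split_ifs with h
        · exact le_of_lt h.2.2
        · exact le_refl _
      have hb'cases : best' = best
          ∨ (condZ k row = true ∧ best' = (((row :: tl).count row : ℕ) : Int)) := by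
        rw [hbest']; split_ifs with h
        · right
          exact ⟨(guard_iff_condZ row k).mp ⟨h.1, h.2.1⟩, hcountrow.symm⟩
        · left; rfl
      refine ⟨le_trans hb'ge ih1, ?_, ?_⟩
      · intro r hr hc
        by_cases hre : r = row
        · subst hre
          rw [hcountrow]
          by_cases hgt : cnt > best
          · have : best' = cnt := by
              rw [hbest', if_pos ⟨((guard_iff_condZ r k).mpr hc).1,
                ((guard_iff_condZ r k).mpr hc).2, hgt⟩]
            rw [← this]; exact ih1
          · exact le_trans (le_trans (not_lt.mp hgt) hb'ge) ih1
        · have hrt : r ∈ tl := List.mem_cons.mp hr |>.resolve_left hre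
          have hrr : r ∈ rest := by
            rcases List.mem_append.mp (hsplit ▸ hrt) with h | h
            · exact absurd (hruneq r h) hre
            · exact h
          have := ih2 r hrr hc
          rw [hcountne r hre]
          exact this
      · rcases ih3 with h | ⟨r, hr, hc, he⟩
        · rcases hb'cases with hb | ⟨hc, hb⟩
          · left; rw [h, hb]
          · right; exact ⟨row, List.mem_cons_self, hc, by rw [h, hb]⟩
        · right
          have hne : r ≠ row := fun he' => hnm (he' ▸ hr)
          have hrl : r ∈ row :: tl := by
            apply List.mem_cons_of_mem
            rw [← hsplit]
            exact List.mem_append_right _ hr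
          exact ⟨r, hrl, hc, by rw [he, hcountne r hne]⟩

theorem solution_alt_good (mat : List String) (k : Int) :
    GoodMax mat k (solution_alt mat k) := by
  unfold solution_alt
  set srt := PySem.List.sorted mat (fun x => x) false with hsrt
  have hperm : srt.Perm mat := hsrt ▸ PySem.List.sorted_perm mat _ _
  have hp : srt.Pairwise (· ≤ ·) := by
    have := PySem.List.sorted_pairwise (xs := mat) (key := fun x => x)
    simpa using this
  obtain ⟨h1, h2, h3⟩ := runMax_good k srt hp 0
  refine ⟨h1, ?_, ?_⟩
  · intro r hr hc
    have := h2 r (hperm.mem_iff.mpr hr) hc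
    rwa [hperm.count_eq r] at this
  · rcases h3 with h | ⟨r, hr, hc, he⟩
    · left; exact h
    · right
      exact ⟨r, hperm.mem_iff.mp hr, hc, by rw [he, hperm.count_eq r]⟩

-- ===== VERDICT (by name: the statement is the Claim_ definition above) =====
theorem solution_spec : Claim_equal_solution := by
  intro mat k _
  unfold Spec_solution
  exact goodMax_unique mat k _ _ (solution_good mat k) (solution_alt_good mat k)
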